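-- pv_equiv track=rewrite | github.com/oogarasu-raven0/activity-watch-log-2-diary | slim-aw-log.py | common_suffix
-- ===== SOURCE A (Python) =====
-- def common_suffix(strings):
--     if not strings:
--         return ""
--
--     split = [s.split(" - ") for s in strings]
--     min_len = min(len(s) for s in split)
--
--     suffix = []
--     for i in range(1, min_len + 1):
--         parts = {s[-i] for s in split}
--         if len(parts) == 1:
--             suffix.insert(0, parts.pop())
--         else:
--             break
--
--     return " - ".join(suffix)
-- ===== SOURCE B (Python) =====
-- def common_suffix(strings):
--     if not strings:
--         return ""
--
--     def helper(a, b):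
--         common = []
--         for x, y in zip(reversed(a), reversed(b)):
--             if x != y:
--                 break
--             common.append(x)
--         common.reverse()
--         return common
--
--     split = [s.split(" - ") for s in strings]
--     acc = split[0]
--     for parts in split[1:]:
--         acc = helper(acc, parts)
--     return " - ".join(acc)
-- ===== Notes on version B (the rewrite author's own statement) =====
-- stated objective: alternative
-- what changed: Replaces A's indexed per-position scan that builds a set of the i-th-from-end parts across all strings with a pairwise common-suffix helper (walking two reversed part-lists) folded left across the split lists.
import Mathlib
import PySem

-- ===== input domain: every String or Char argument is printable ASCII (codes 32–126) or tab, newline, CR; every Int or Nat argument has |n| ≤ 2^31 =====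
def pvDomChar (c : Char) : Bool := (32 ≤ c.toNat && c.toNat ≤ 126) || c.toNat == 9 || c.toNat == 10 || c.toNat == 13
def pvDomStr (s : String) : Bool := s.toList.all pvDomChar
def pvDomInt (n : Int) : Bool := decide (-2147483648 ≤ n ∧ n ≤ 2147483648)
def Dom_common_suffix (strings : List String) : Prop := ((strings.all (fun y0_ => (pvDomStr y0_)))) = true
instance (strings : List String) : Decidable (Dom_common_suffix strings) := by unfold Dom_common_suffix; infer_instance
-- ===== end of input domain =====

-- B replaces A's per-position set-across-all-strings scan by a pairwise common-suffix helper folded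
-- across the split lists (objective: alternative decomposition, same cost).

-- ===== PORT A =====
-- s.split(" - ") with a nonempty literal separator: split? returns some; getD's default is unreachable.
def csSplit (s : String) : List String := (PySem.Str.split? s " - ").getD []

-- for i in range(1, min_len+1): parts = {s[-i] for s in split}; singleton -> insert(0, .) else break
-- s[-i] is in range whenever i ≤ minLen, so pyGetD's default is never used inside the loop.
-- parts.pop() on a set known to have len 1 is its unique element, here the set's head.
def csLoopA (split : List (List String)) (minLen : Nat) (i : Nat) (suffix : List String) :
    List String :=
  if i ≤ minLen then
    let parts : PySem.Set String :=
      PySem.Set.ofList (split.map (fun s => PySem.List.pyGetD s (-(i : Int)) ""))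
    if parts.length = 1 then
      csLoopA split minLen (i + 1) (parts.headD "" :: suffix)
    else suffix
  else suffix
termination_by minLen + 1 - i

def common_suffix (strings : List String) : String :=
  if strings = [] then ""
  else
    let split := strings.map (fun s => csSplit s)
    let minLen := (PySem.List.min? (split.map List.length) (fun x => x)).getD 0
    PySem.Str.join " - " (csLoopA split minLen 1 [])

-- ===== PORT B =====
def csCollect : List String → List String → List String → List String
  | x :: xs, y :: ys, common => if x ≠ y then common else csCollect xs ys (common ++ [x])
  | _, _, common => common

def csHelper (a b : List String) : List String :=
  (csCollect a.reverse b.reverse []).reverse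

def common_suffix_alt (strings : List String) : String :=
  match strings with
  | [] => ""
  | s0 :: rest =>
      PySem.Str.join " - "
        ((rest.map (fun s => csSplit s)).foldl csHelper
          (csSplit s0))

-- ===== PRECONDITION & SPEC =====
def Spec_common_suffix (strings : List String) (out : String) : Prop := out = common_suffix_alt strings
instance (strings : List String) (out : String) : Decidable (Spec_common_suffix strings out) := by unfold Spec_common_suffix; infer_instance

-- ===== CLAIM (what is proved, stated in full; the proofs are below) =====
def Claim_equal_common_suffix : Prop := ∀ (strings : List String), Dom_common_suffix strings → Spec_common_suffix strings (common_suffix strings)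

-- ===== LEMMAS AND PROOFS =====

/-- longest common prefix of two lists -/
def csCp : List String → List String → List String
  | x :: xs, y :: ys => if x = y then x :: csCp xs ys else []
  | _, _ => []

theorem csCp_nil_left (r : List String) : csCp [] r = [] := by cases r <;> rfl

theorem csCp_nil_right (a : List String) : csCp a [] = [] := by cases a <;> rfl

theorem csCollect_eq (xs ys common : List String) :
    csCollect xs ys common = common ++ csCp xs ys := by
  induction xs generalizing ys common with
  | nil => cases ys <;> simp [csCollect, csCp]
  | cons x xs ih =>
      cases ys with
      | nil => simp [csCollect, csCp]
      | cons y ys =>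
          by_cases h : x = y <;> simp [csCollect, csCp, h, ih]

theorem csHelper_eq (a b : List String) :
    csHelper a b = (csCp a.reverse b.reverse).reverse := by
  simp [csHelper, csCollect_eq]

theorem foldl_csCp_nil (rs : List (List String)) : rs.foldl csCp [] = [] := by
  induction rs with
  | nil => rfl
  | cons r rs ih => simpa [csCp_nil_left r] using ih

theorem foldl_csCp_mem_nil (acc : List String) (rs : List (List String)) (h : [] ∈ rs) :
    rs.foldl csCp acc = [] := by
  induction rs generalizing acc with
  | nil => cases h
  | cons r rs ih =>
      rw [List.mem_cons] at h
      rcases h with h | h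
      · rw [← h]; simp [List.foldl, csCp_nil_right, foldl_csCp_nil]
      · exact ih _ h

/-- step: every list starts with x → peel one layer -/
theorem foldl_csCp_cons (x : String) (a : List String) (rs : List (List String))
    (h : ∀ r ∈ rs, ∃ r', r = x :: r') :
    rs.foldl csCp (x :: a) = x :: (rs.map List.tail).foldl csCp a := by
  induction rs generalizing a with
  | nil => rfl
  | cons r rs ih =>
      obtain ⟨r', rfl⟩ := h r (by simp)
      simp only [List.foldl, List.map, csCp, if_true, List.tail]
      exact ih _ (fun r hr => h r (by simp [hr]))

/-- fail: some list does not start with x → result empty -/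
theorem foldl_csCp_fail (x : String) (a : List String) (rs : List (List String))
    (h : ∃ r ∈ rs, r.head? ≠ some x) :
    rs.foldl csCp (x :: a) = [] := by
  induction rs generalizing a with
  | nil => simp at h
  | cons r rs ih =>
      rcases h with ⟨r0, hr0, hne⟩
      rw [List.mem_cons] at hr0
      rcases hr0 with rfl | hr0
      · cases r0 with
        | nil => simp [List.foldl, csCp_nil_right, foldl_csCp_nil]
        | cons y ys =>
            have hxy : x ≠ y := by simpa [eq_comm] using hne
            simp [List.foldl, csCp, hxy, foldl_csCp_nil]
      · cases r with
        | nil => simp [List.foldl, csCp_nil_right, foldl_csCp_nil]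
        | cons y ys =>
            by_cases hxy : x = y
            · subst hxy
              simpa [List.foldl, csCp] using ih _ ⟨r0, hr0, hne⟩
            · simp [List.foldl, csCp, hxy, foldl_csCp_nil]

theorem foldl_csHelper_eq (h : List String) (t : List (List String)) :
    t.foldl csHelper h = ((t.map List.reverse).foldl csCp h.reverse).reverse := by
  induction t generalizing h with
  | nil => simp
  | cons b t ih => simp [List.foldl, csHelper_eq, ih]

/-- singleton set characterisation -/
theorem ofList_eq_singleton_iff (e : String) (l : List String) :
    (PySem.Set.ofList (e :: l)).length = 1 ↔ ∀ y ∈ l, y = e := by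
  constructor
  · intro hlen y hy
    have hnd := PySem.Set.nodup_ofList (xs := e :: l)
    have hmem : y ∈ PySem.Set.ofList (e :: l) := (PySem.Set.mem_ofList _ _).2 (by simp [hy])
    have hmem' : e ∈ PySem.Set.ofList (e :: l) := (PySem.Set.mem_ofList _ _).2 (by simp)
    rcases List.length_eq_one_iff.1 hlen with ⟨z, hz⟩
    rw [hz] at hmem hmem'
    simp at hmem hmem'
    rw [hmem, hmem']
  · intro hall
    have : PySem.Set.ofList (e :: l) = [e] := by
      rw [PySem.Set.ofList_cons]
      have : PySem.Set.ofList l = [] ∨ PySem.Set.ofList l = [e] := by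
        induction l with
        | nil => left; rfl
        | cons y l ih =>
            have hy : y = e := hall y (by simp)
            subst hy
            rcases ih (fun z hz => hall z (by simp [hz])) with h | h <;>
              simp [PySem.Set.ofList_cons, h, PySem.Set.discard]
      rcases this with h | h <;> simp [h, PySem.Set.discard]
    simp [this]

theorem ofList_headD (e : String) (l : List String) :
    (PySem.Set.ofList (e :: l)).headD "" = e := by
  simp [PySem.Set.ofList_cons]

/-- index bridge: s[-i] = s.reverse[i-1] for 1 ≤ i ≤ len s -/
theorem pyGetD_neg_rev (s : List String) (i : Nat) (h1 : 1 ≤ i) (h2 : i ≤ s.length) :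
    PySem.List.pyGetD s (-(i : Int)) "" = s.reverse.getD (i - 1) "" := by
  rw [PySem.List.pyGetD_neg_natCast s i "" (by omega) h2]
  have hlt : s.length - i < s.length := by omega
  have : i - 1 < s.length := by omega
  rw [List.getD_eq_getElem _ _ (by simpa using this)]
  rw [List.getElem_reverse]
  congr 1
  omega

theorem drop_head_getD (r : List String) (j : Nat) (h : j < r.length) :
    r.drop j = r.getD j "" :: r.drop (j + 1) := by
  rw [List.getD_eq_getElem _ _ h]
  exact List.drop_eq_getElem_cons h

/-- main A-side characterisation -/
theorem csLoopA_eq (hs : List String) (ts : List (List String)) (minLen : Nat)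
    (hmin_le : ∀ r ∈ hs :: ts, minLen ≤ r.length)
    (hmin_mem : ∃ r ∈ hs :: ts, r.length = minLen) :
    ∀ i suffix, 1 ≤ i →
      csLoopA (hs :: ts) minLen i suffix =
        ((ts.map (fun r => r.reverse.drop (i - 1))).foldl csCp (hs.reverse.drop (i - 1))).reverse
          ++ suffix := by
  intro i suffix h1
  induction hfuel : minLen + 1 - i generalizing i suffix with
  | zero =>
      have hi : ¬ i ≤ minLen := by omega
      rw [csLoopA, if_neg hi]
      have : ∃ r ∈ hs :: ts, r.reverse.drop (i - 1) = [] := by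
        obtain ⟨r, hr, hlen⟩ := hmin_mem
        exact ⟨r, hr, by rw [List.drop_eq_nil_iff]; simp; omega⟩
      obtain ⟨r, hr, hnil⟩ := this
      rw [List.mem_cons] at hr
      rcases hr with rfl | hr
      · rw [hnil, foldl_csCp_nil]; rfl
      · rw [foldl_csCp_mem_nil _ _ (by rw [List.mem_map]; exact ⟨r, hr, hnil⟩)]; rfl
  | succ fuel ih =>
      have hi : i ≤ minLen := by omega
      rw [csLoopA, if_pos hi]
      -- the values s[-i]
      have hget : ∀ r ∈ hs :: ts, PySem.List.pyGetD r (-(i : Int)) "" = r.reverse.getD (i - 1) "" := by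
        intro r hr
        exact pyGetD_neg_rev r i h1 (le_trans hi (hmin_le r hr))
      have hjlt : ∀ r ∈ hs :: ts, i - 1 < r.reverse.length := by
        intro r hr
        have := hmin_le r hr
        simp; omega
      have hdrop : ∀ r ∈ hs :: ts,
          r.reverse.drop (i - 1) = r.reverse.getD (i - 1) "" :: r.reverse.drop i := by
        intro r hr
        have := drop_head_getD r.reverse (i - 1) (hjlt r hr)
        rwa [Nat.sub_add_cancel h1] at this
      simp only [List.map_cons]
      rw [hget hs (by simp)]
      by_cases hsing :
          (PySem.Set.ofList
            (hs.reverse.getD (i - 1) "" :: ts.map (fun s => PySem.List.pyGetD s (-(i : Int)) ""))).length = 1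
      · rw [if_pos hsing, ofList_headD]
        have hall : ∀ r ∈ ts, r.reverse.getD (i - 1) "" = hs.reverse.getD (i - 1) "" := by
          intro r hr
          have := (ofList_eq_singleton_iff _ _).1 hsing (PySem.List.pyGetD r (-(i : Int)) "")
            (by rw [List.mem_map]; exact ⟨r, hr, rfl⟩)
          rwa [hget r (by simp [hr])] at this
        rw [ih (i + 1) _ (by omega) (by omega)]
        -- rewrite RHS: peel one element off every list
        rw [hdrop hs (by simp)]
        have hmap : ts.map (fun r => r.reverse.drop (i - 1)) =
            ts.map (fun r => hs.reverse.getD (i - 1) "" :: r.reverse.drop i) := by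
          apply List.map_congr_left
          intro r hr
          rw [hdrop r (by simp [hr]), hall r hr]
        rw [hmap]
        rw [foldl_csCp_cons _ _ _ (by
          intro r' hr'
          rw [List.mem_map] at hr'
          obtain ⟨r, _, rfl⟩ := hr'
          exact ⟨_, rfl⟩)]
        have : (ts.map (fun r => hs.reverse.getD (i - 1) "" :: r.reverse.drop i)).map List.tail =
            ts.map (fun r => r.reverse.drop ((i + 1) - 1)) := by
          rw [List.map_map]; apply List.map_congr_left; intro r _; simp
        rw [this]
        simp
      · rw [if_neg hsing]
        -- some element differs from the head's
        have hex : ∃ r ∈ ts, r.reverse.getD (i - 1) "" ≠ hs.reverse.getD (i - 1) "" := by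
          by_contra hno
          push Not at hno
          apply hsing
          rw [ofList_eq_singleton_iff]
          intro y hy
          rw [List.mem_map] at hy
          obtain ⟨r, hr, rfl⟩ := hy
          rw [hget r (by simp [hr])]
          exact hno r hr
        obtain ⟨r, hr, hne⟩ := hex
        rw [hdrop hs (by simp)]
        rw [foldl_csCp_fail _ _ _ (by
          refine ⟨r.reverse.drop (i - 1), by rw [List.mem_map]; exact ⟨r, hr, rfl⟩, ?_⟩
          rw [hdrop r (by simp [hr])]
          simpa using hne)]
        rfl

-- ===== VERDICT (by name: the statement is the Claim_ definition above) =====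
theorem common_suffix_spec : Claim_equal_common_suffix := by
  intro strings _
  unfold Spec_common_suffix common_suffix common_suffix_alt
  cases strings with
  | nil => rfl
  | cons s0 rest =>
      simp only [if_neg (by simp : ¬ (s0 :: rest = []))]
      set split := (s0 :: rest).map (fun s => csSplit s) with hsplit
      set minLen := (PySem.List.min? (split.map List.length) (fun x => x)).getD 0 with hml
      have hne : split.map List.length ≠ [] := by simp [hsplit]
      obtain ⟨m, hm⟩ := Option.ne_none_iff_exists'.1
        (fun h => hne ((PySem.List.min?_eq_none_iff (xs := split.map List.length) (key := fun x : Nat => x)).1 h))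
      have hmlm : minLen = m := by rw [hml, hm]; rfl
      have hmin_le : ∀ r ∈ split, minLen ≤ r.length := by
        intro r hr
        rw [hmlm]
        exact PySem.List.min?_isMin hm r.length (by rw [List.mem_map]; exact ⟨r, hr, rfl⟩)
      have hmin_mem : ∃ r ∈ split, r.length = minLen := by
        have := PySem.List.min?_mem hm
        rw [List.mem_map] at this
        obtain ⟨r, hr, hrl⟩ := this
        exact ⟨r, hr, by rw [hmlm, hrl]⟩
      have hsplit' : split = csSplit s0 :: rest.map (fun s => csSplit s) := by
        simp [hsplit]
      rw [hsplit'] at hmin_le hmin_mem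
      have := csLoopA_eq _ _ minLen hmin_le hmin_mem 1 [] (le_refl 1)
      rw [hsplit', this]
      rw [foldl_csHelper_eq]
      simp
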